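-- pv_equiv track=rewrite | github.com/smeea/vdb | flask-backend/search_crypt_components.py | get_crypt_by_name
-- ===== SOURCE A (Python) =====
-- def is_match_by_initials(initials, text):
--     prev_index = 0
--
--     for c in initials:
--         index = text.find(c, prev_index)
--         if index == -1:
--             return False
--         if index != prev_index:
--             if index != 0 and text[index - 1].isalnum():
--                 return False
--
--         prev_index = index + 1
--
--     return True
--
-- def get_crypt_by_name(pattern, crypt):
--     match_cards = []
--     remaining_cards = []
--     match_cards_by_initials = []
--     pattern = pattern.lower()
--     for card in crypt:
--         if pattern in card["ASCII Name"].lower() or pattern in card["Name"].lower():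
--             match_cards.append(card)
--         else:
--             remaining_cards.append(card)
--
--     for card in remaining_cards:
--         if is_match_by_initials(
--             pattern, card["ASCII Name"].lower()
--         ) or is_match_by_initials(pattern, card["Name"].lower()):
--             match_cards_by_initials.append(card)
--
--     return match_cards + match_cards_by_initials
-- ===== SOURCE B (Python) =====
-- def is_match_by_initials(initials, text):
--     prev_index = 0
--
--     for c in initials:
--         index = text.find(c, prev_index)
--         if index == -1:
--             return False
--         if index != prev_index:
--             if index != 0 and text[index - 1].isalnum():
--                 return False
--
--         prev_index = index + 1
--
--     return True
--
--
-- def get_crypt_by_name(pattern, crypt):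
--     # decorate-sort-filter: tag each card with a match rank (0 substring,
--     # 1 initials, 2 none), stable-sort by rank, keep ranks < 2.
--     pattern = pattern.lower()
--
--     def rank(card):
--         ascii_lower = card["ASCII Name"].lower()
--         name_lower = card["Name"].lower()
--         if pattern in ascii_lower or pattern in name_lower:
--             return 0
--         if is_match_by_initials(pattern, ascii_lower) or is_match_by_initials(
--             pattern, name_lower
--         ):
--             return 1
--         return 2
--
--     decorated = [(rank(card), card) for card in crypt]
--     decorated.sort(key=lambda rc: rc[0])
--     return [card for r, card in decorated if r < 2]
-- ===== Notes on version B (the rewrite author's own statement) =====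
-- stated objective: alternative
-- what changed: Decorate-sort-filter: each card is tagged with a match rank (0 substring, 1 initials, 2 none), the tagged list is stably sorted by rank and ranks below 2 are kept, replacing A's two staged loops and the remaining_cards intermediate.
import Mathlib
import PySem

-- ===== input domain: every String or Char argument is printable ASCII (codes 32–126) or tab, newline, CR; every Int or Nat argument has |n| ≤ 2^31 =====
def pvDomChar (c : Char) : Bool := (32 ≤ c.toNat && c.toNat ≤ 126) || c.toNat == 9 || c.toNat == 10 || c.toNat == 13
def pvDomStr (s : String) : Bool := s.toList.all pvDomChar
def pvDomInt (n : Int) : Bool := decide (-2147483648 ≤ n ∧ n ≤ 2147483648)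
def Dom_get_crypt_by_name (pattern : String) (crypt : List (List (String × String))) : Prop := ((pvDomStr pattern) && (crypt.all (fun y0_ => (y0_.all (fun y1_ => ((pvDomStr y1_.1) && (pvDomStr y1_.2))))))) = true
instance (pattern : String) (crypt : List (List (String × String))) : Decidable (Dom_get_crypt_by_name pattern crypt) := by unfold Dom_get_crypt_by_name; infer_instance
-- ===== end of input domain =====

-- B replaces A's two staged loops by decorate-sort-filter (tag each card with a match
-- rank 0/1/2, stable-sort by rank, keep ranks < 2); return value proved equal.

-- ===== PORT A =====
-- shared helper: card[k] for the assoc-list dict (value under Pre_, "" only outside it)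
def pvGetKey (card : List (String × String)) (k : String) : String :=
  PySem.Dict.getD (PySem.Dict.mk card) k ""

-- helper is_match_by_initials (identical in Source A and Source B); loop over the initials chars
def pvIMBI (text : String) : List Char → Int → Bool
  | [], _ => true
  | c :: rest, prev =>
    let index := PySem.Str.findFrom text (String.ofList [c]) prev none
    if index = -1 then false
    else if index ≠ prev ∧ index ≠ 0 ∧
        ((PySem.Str.pyGet? text (index - 1)).map PySem.Chars.isalnum).getD false then false
    else pvIMBI text rest (index + 1)

def is_match_by_initials (initials text : String) : Bool :=
  pvIMBI text initials.toList 0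

def get_crypt_by_name (pattern : String) (crypt : List (List (String × String))) : List (List (String × String)) :=
  let p := PySem.Str.lower pattern
  let mr := crypt.foldl (fun (mr : List (List (String × String)) × List (List (String × String))) card =>
      if PySem.Str.isIn p (PySem.Str.lower (pvGetKey card "ASCII Name")) ||
         PySem.Str.isIn p (PySem.Str.lower (pvGetKey card "Name")) then
        (mr.1 ++ [card], mr.2)
      else
        (mr.1, mr.2 ++ [card])) ([], [])
  let mbi := mr.2.foldl (fun acc card =>
      if is_match_by_initials p (PySem.Str.lower (pvGetKey card "ASCII Name")) ||
         is_match_by_initials p (PySem.Str.lower (pvGetKey card "Name")) then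
        acc ++ [card]
      else acc) []
  mr.1 ++ mbi

-- ===== PORT B =====
-- Source B's inner 'rank': 0 = substring match, 1 = initials match, 2 = no match
def pvRankB (p : String) (card : List (String × String)) : Int :=
  let ascii_lower := PySem.Str.lower (pvGetKey card "ASCII Name")
  let name_lower := PySem.Str.lower (pvGetKey card "Name")
  if PySem.Str.isIn p ascii_lower || PySem.Str.isIn p name_lower then 0
  else if is_match_by_initials p ascii_lower || is_match_by_initials p name_lower then 1
  else 2

def get_crypt_by_name_alt (pattern : String) (crypt : List (List (String × String))) : List (List (String × String)) :=
  let p := PySem.Str.lower pattern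
  let decorated := crypt.map (fun card => (pvRankB p card, card))
  let sortedDec := PySem.List.sorted decorated (fun rc => rc.1) false
  sortedDec.filterMap (fun rc => if rc.1 < 2 then some rc.2 else none)

-- ===== PRECONDITION & SPEC =====
-- Pre_ excludes crypts with a card missing the "ASCII Name" or "Name" key: A raises KeyError on
-- almost all of them, and the rare return (when the short-circuited substring test matches before
-- the missing key is read) is an artefact of lazy 'or' evaluation; B always reads both keys and
-- raises KeyError there.
def Pre_get_crypt_by_name (pattern : String) (crypt : List (List (String × String))) : Prop :=
  ∀ card ∈ crypt, (PySem.Dict.mk card).contains "ASCII Name" = true ∧ (PySem.Dict.mk card).contains "Name" = true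
instance (pattern : String) (crypt : List (List (String × String))) : Decidable (Pre_get_crypt_by_name pattern crypt) := by unfold Pre_get_crypt_by_name; infer_instance

def pvWitness_get_crypt_by_name : String × (List (List (String × String))) :=
  ("ab", [[("ASCII Name", "Alice Blue"), ("Name", "Alice Blue")], [("ASCII Name", "Carl"), ("Name", "Carl")]])

def Spec_get_crypt_by_name (pattern : String) (crypt : List (List (String × String))) (out : List (List (String × String))) : Prop := out = get_crypt_by_name_alt pattern crypt
instance (pattern : String) (crypt : List (List (String × String))) (out : List (List (String × String))) : Decidable (Spec_get_crypt_by_name pattern crypt out) := by unfold Spec_get_crypt_by_name; infer_instance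

-- ===== CLAIM (what is proved, stated in full; the proofs are below) =====
def Claim_equal_get_crypt_by_name : Prop := ∀ (pattern : String) (crypt : List (List (String × String))), Dom_get_crypt_by_name pattern crypt → Pre_get_crypt_by_name pattern crypt → Spec_get_crypt_by_name pattern crypt (get_crypt_by_name pattern crypt)

-- ===== LEMMAS AND PROOFS =====
-- the two per-card tests, named for the proofs (definitionally the ports' conditions)
def pvSub (p : String) (card : List (String × String)) : Bool :=
  PySem.Str.isIn p (PySem.Str.lower (pvGetKey card "ASCII Name")) ||
  PySem.Str.isIn p (PySem.Str.lower (pvGetKey card "Name"))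
def pvInit (p : String) (card : List (String × String)) : Bool :=
  is_match_by_initials p (PySem.Str.lower (pvGetKey card "ASCII Name")) ||
  is_match_by_initials p (PySem.Str.lower (pvGetKey card "Name"))

lemma foldlA_eq (p : String) (xs : List (List (String × String)))
    (m r : List (List (String × String))) :
    xs.foldl (fun (mr : List (List (String × String)) × List (List (String × String))) card =>
      if pvSub p card then (mr.1 ++ [card], mr.2)
      else (mr.1, mr.2 ++ [card])) (m, r)
    = (m ++ xs.filter (pvSub p), r ++ xs.filter (fun c => !pvSub p c)) := by
  induction xs generalizing m r with
  | nil => simp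
  | cons x t ih =>
    simp only [List.foldl_cons, List.filter_cons]
    cases hb : pvSub p x
    · simp [hb, ih]
    · simp [hb, ih]

lemma foldl2_eq (p : String) (xs : List (List (String × String)))
    (acc : List (List (String × String))) :
    xs.foldl (fun acc card => if pvInit p card then acc ++ [card] else acc) acc
    = acc ++ xs.filter (pvInit p) := by
  induction xs generalizing acc with
  | nil => simp
  | cons x t ih =>
    simp only [List.foldl_cons, List.filter_cons]
    cases hb : pvInit p x
    · simp [hb, ih]
    · simp [hb, ih]

-- insertion of x after every element it does not go before, before a block it goes before
lemma insertBy_mid {α : Type} (before : α → α → Bool) (x : α) (as bs : List α)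
    (h1 : ∀ y ∈ as, before x y = false) (h2 : ∀ y ∈ bs, before x y = true) :
    PySem.List.insertBy before x (as ++ bs) = as ++ x :: bs := by
  induction as with
  | nil =>
    cases bs with
    | nil => rfl
    | cons b bt => simp [PySem.List.insertBy, h2 b (by simp)]
  | cons a at' ih =>
    simp only [List.cons_append, PySem.List.insertBy, h1 a (by simp)]
    simp only [Bool.false_eq_true, if_false, List.cons.injEq, true_and]
    exact ih (fun y hy => h1 y (by simp [hy]))

-- the stable insertion sort on keys in {0,1,2} is the three rank-filters in order
lemma sorted_rank_eq {α : Type} (xs : List (Int × α))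
    (h : ∀ x ∈ xs, x.1 = 0 ∨ x.1 = 1 ∨ x.1 = 2) :
    PySem.List.sorted xs (fun rc => rc.1) false
    = xs.filter (fun x => x.1 == 0) ++ xs.filter (fun x => x.1 == 1)
        ++ xs.filter (fun x => x.1 == 2) := by
  rw [PySem.List.sorted_eq_foldl_insertBy]
  induction xs using List.reverseRecOn with
  | nil => rfl
  | append_singleton ys x ih =>
    have hys : ∀ y ∈ ys, y.1 = 0 ∨ y.1 = 1 ∨ y.1 = 2 := fun y hy => h y (by simp [hy])
    rw [List.foldl_append, List.foldl_cons, List.foldl_nil, ih hys]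
    have hx := h x (by simp)
    have f0 : ∀ y ∈ ys.filter (fun x => x.1 == 0), y.1 = 0 := by
      intro y hy; simpa using (List.of_mem_filter hy)
    have f1 : ∀ y ∈ ys.filter (fun x => x.1 == 1), y.1 = 1 := by
      intro y hy; simpa using (List.of_mem_filter hy)
    have f2 : ∀ y ∈ ys.filter (fun x => x.1 == 2), y.1 = 2 := by
      intro y hy; simpa using (List.of_mem_filter hy)
    rcases hx with hx | hx | hx
    · rw [show ys.filter (fun x => x.1 == 0) ++ ys.filter (fun x => x.1 == 1)
            ++ ys.filter (fun x => x.1 == 2)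
          = ys.filter (fun x => x.1 == 0) ++ (ys.filter (fun x => x.1 == 1)
            ++ ys.filter (fun x => x.1 == 2)) by simp]
      rw [insertBy_mid _ _ _ _
          (fun y hy => by simp [f0 y hy, hx])
          (fun y hy => by
            rcases List.mem_append.1 hy with hy | hy
            · simp [f1 y hy, hx]
            · simp [f2 y hy, hx])]
      simp [List.filter_append, List.filter_cons, hx]
    · rw [show ys.filter (fun x => x.1 == 0) ++ ys.filter (fun x => x.1 == 1)
            ++ ys.filter (fun x => x.1 == 2)
          = (ys.filter (fun x => x.1 == 0) ++ ys.filter (fun x => x.1 == 1))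
            ++ ys.filter (fun x => x.1 == 2) by simp]
      rw [insertBy_mid _ _ _ _
          (fun y hy => by
            rcases List.mem_append.1 hy with hy | hy
            · simp [f0 y hy, hx]
            · simp [f1 y hy, hx])
          (fun y hy => by simp [f2 y hy, hx])]
      simp [List.filter_append, List.filter_cons, hx]
    · rw [PySem.List.insertBy_of_forall_not_before _ _ _
          (fun y hy => by
            rcases List.mem_append.1 hy with hy | hy
            · rcases List.mem_append.1 hy with hy | hy
              · simp [f0 y hy, hx]
              · simp [f1 y hy, hx]
            · simp [f2 y hy, hx])]
      simp [List.filter_append, List.filter_cons, hx]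

lemma rankB_cases (p : String) (card : List (String × String)) :
    (pvRankB p card = 0 ∧ pvSub p card = true)
    ∨ (pvRankB p card = 1 ∧ pvSub p card = false ∧ pvInit p card = true)
    ∨ (pvRankB p card = 2 ∧ pvSub p card = false ∧ pvInit p card = false) := by
  unfold pvRankB pvSub pvInit
  dsimp only
  split_ifs with h1 h2 <;> simp_all

lemma filterMap_keep {α : Type} (xs : List (Int × α)) (h : ∀ x ∈ xs, x.1 < 2) :
    xs.filterMap (fun rc => if rc.1 < 2 then some rc.2 else none) = xs.map Prod.snd := by
  induction xs with
  | nil => rfl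
  | cons a t ih =>
    rw [List.filterMap_cons, if_pos (h a (by simp)), List.map_cons,
      ih (fun x hx => h x (by simp [hx]))]

lemma filterMap_drop {α : Type} (xs : List (Int × α)) (h : ∀ x ∈ xs, ¬ x.1 < 2) :
    xs.filterMap (fun rc => if rc.1 < 2 then some rc.2 else none) = [] := by
  induction xs with
  | nil => rfl
  | cons a t ih =>
    rw [List.filterMap_cons, if_neg (h a (by simp))]
    exact ih (fun x hx => h x (by simp [hx]))

-- the three decorated buckets, undecorated
lemma bucket0 (p : String) (crypt : List (List (String × String))) :
    ((crypt.map (fun card => (pvRankB p card, card))).filter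
        (fun x => x.1 == 0)).filterMap
      (fun rc => if rc.1 < 2 then some rc.2 else none)
    = crypt.filter (pvSub p) := by
  rw [List.filter_map]
  have hpred : crypt.filter ((fun (x : Int × List (String × String)) => x.1 == 0) ∘
      (fun card => (pvRankB p card, card))) = crypt.filter (pvSub p) := by
    refine List.filter_congr (fun c _ => ?_)
    rcases rankB_cases p c with ⟨h, hs⟩ | ⟨h, hs, _⟩ | ⟨h, hs, _⟩ <;> simp [h, hs]
  rw [hpred, filterMap_keep _ (by
    intro x hx
    rcases List.mem_map.1 hx with ⟨c, hc, rfl⟩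
    have hs : pvSub p c = true := by simpa using (List.mem_filter.1 hc).2
    rcases rankB_cases p c with ⟨h, _⟩ | ⟨_, hs2, _⟩ | ⟨_, hs2, _⟩ <;> simp_all)]
  simp [Function.comp_def]

lemma bucket1 (p : String) (crypt : List (List (String × String))) :
    ((crypt.map (fun card => (pvRankB p card, card))).filter
        (fun x => x.1 == 1)).filterMap
      (fun rc => if rc.1 < 2 then some rc.2 else none)
    = (crypt.filter (fun c => !pvSub p c)).filter (pvInit p) := by
  rw [List.filter_map]
  have hpred : crypt.filter ((fun (x : Int × List (String × String)) => x.1 == 1) ∘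
      (fun card => (pvRankB p card, card))) =
      (crypt.filter (fun c => !pvSub p c)).filter (pvInit p) := by
    rw [List.filter_filter]
    refine List.filter_congr (fun c _ => ?_)
    rcases rankB_cases p c with ⟨h, hs⟩ | ⟨h, hs, hi⟩ | ⟨h, hs, hi⟩
    · simp [h, hs]
    · simp [h, hs, hi]
    · simp [h, hs, hi]
  rw [hpred, filterMap_keep _ (by
    intro x hx
    rcases List.mem_map.1 hx with ⟨c, hc, rfl⟩
    have hi : pvInit p c = true := by simpa using (List.mem_filter.1 hc).2
    have hs : pvSub p c = false := by
      simpa using (List.mem_filter.1 (List.mem_filter.1 hc).1).2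
    rcases rankB_cases p c with ⟨_, hs2⟩ | ⟨h, _, _⟩ | ⟨_, _, hi2⟩ <;> simp_all)]
  simp [Function.comp_def]

lemma bucket2 (p : String) (crypt : List (List (String × String))) :
    ((crypt.map (fun card => (pvRankB p card, card))).filter
        (fun x => x.1 == 2)).filterMap
      (fun rc => if rc.1 < 2 then some rc.2 else none)
    = [] := by
  refine filterMap_drop _ (fun x hx => ?_)
  have := (List.mem_filter.1 hx).2
  simp only [beq_iff_eq] at this
  omega

-- ===== VERDICT (by name: the statement is the Claim_ definition above) =====
theorem get_crypt_by_name_spec : Claim_equal_get_crypt_by_name := by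
  intro pattern crypt _hdom _hpre
  show get_crypt_by_name pattern crypt = get_crypt_by_name_alt pattern crypt
  have key : ∀ (p : String) (c : List (List (String × String))),
      ((c.foldl (fun (mr : List (List (String × String)) × List (List (String × String))) card =>
          if pvSub p card then (mr.1 ++ [card], mr.2)
          else (mr.1, mr.2 ++ [card])) ([], [])).1
        ++ ((c.foldl (fun (mr : List (List (String × String)) × List (List (String × String))) card =>
          if pvSub p card then (mr.1 ++ [card], mr.2)
          else (mr.1, mr.2 ++ [card])) ([], [])).2.foldl
            (fun acc card => if pvInit p card then acc ++ [card] else acc) []))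
      = (PySem.List.sorted (c.map (fun card => (pvRankB p card, card)))
          (fun rc => rc.1) false).filterMap
          (fun rc => if rc.1 < 2 then some rc.2 else none) := by
    intro p c
    rw [foldlA_eq, foldl2_eq]
    rw [sorted_rank_eq (c.map (fun card => (pvRankB p card, card)))
        (by intro x hx
            rcases List.mem_map.1 hx with ⟨cc, _, rfl⟩
            rcases rankB_cases p cc with ⟨h, _⟩ | ⟨h, _⟩ | ⟨h, _⟩ <;> simp [h])]
    rw [List.filterMap_append, List.filterMap_append, bucket0, bucket1, bucket2]
    simp
  exact key (PySem.Str.lower pattern) crypt
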